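-- pv_equiv track=rewrite | github.com/ShubhamKumaR-96/DSA_Leetcode | carryForward/AmazingSubarray.py | amazingSubrrcnt
-- ===== SOURCE A (Python) =====
-- def amazingSubrrcnt(S):
--     n=len(S)
--     cnt=0
--
--     vowels=set("aeiouAEIOU")
--     for i in range(n):
--         if S[i] in vowels:
--             cnt+=(n-i)
--     return cnt
-- ===== SOURCE B (Python) =====
-- def amazingSubrrcnt(S):
--     vowels = set("aeiouAEIOU")
--     vcount = 0
--     ans = 0
--     for ch in S:
--         if ch in vowels:
--             vcount += 1
--         ans += vcount
--     return ans
-- ===== Notes on version B (the rewrite author's own statement) =====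
-- stated objective: alternative
-- what changed: Replaces the index loop that adds the closed-form weight (n-i) at each vowel position with a prefix-accumulation pass: a running vowel counter is incremented at vowels and added to the answer at every character, removing all use of len(S) and indexing.
import Mathlib
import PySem

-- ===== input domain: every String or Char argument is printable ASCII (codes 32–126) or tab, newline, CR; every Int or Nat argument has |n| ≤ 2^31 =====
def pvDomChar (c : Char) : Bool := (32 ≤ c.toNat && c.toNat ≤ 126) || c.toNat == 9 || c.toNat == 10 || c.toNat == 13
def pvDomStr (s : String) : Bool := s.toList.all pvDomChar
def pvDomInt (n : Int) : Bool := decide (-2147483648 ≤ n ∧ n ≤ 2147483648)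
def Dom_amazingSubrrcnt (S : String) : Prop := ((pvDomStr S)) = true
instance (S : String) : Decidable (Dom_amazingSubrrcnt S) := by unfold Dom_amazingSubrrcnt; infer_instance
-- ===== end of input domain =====

-- B replaces A's (n-i)-weight-per-vowel index loop by a prefix vowel-count accumulation over the characters (alternative decomposition, same O(n) cost).


-- ===== PORT A =====
-- for i in range(n): if S[i] in vowels: cnt += (n - i)
def amazingSubrrcnt (S : String) : Int :=
  let n : Int := PySem.Str.len S
  let vowels : PySem.Set Char := PySem.Set.ofList "aeiouAEIOU".toList
  (PySem.List.pyRange 0 n 1).foldl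
    (fun cnt i =>
      if PySem.Set.contains vowels (PySem.List.pyGetD S.toList i ' ') then cnt + (n - i)
      else cnt) 0

-- ===== PORT B =====
-- running vowel counter vcount; ans += vcount at every character
def amazingSubrrcnt_alt (S : String) : Int :=
  let vowels : PySem.Set Char := PySem.Set.ofList "aeiouAEIOU".toList
  (S.toList.foldl
    (fun (p : Int × Int) ch =>
      let v := if PySem.Set.contains vowels ch then p.1 + 1 else p.1
      (v, p.2 + v)) (0, 0)).2

-- ===== PRECONDITION & SPEC =====
def Spec_amazingSubrrcnt (S : String) (out : Int) : Prop := out = amazingSubrrcnt_alt S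
instance (S : String) (out : Int) : Decidable (Spec_amazingSubrrcnt S out) := by unfold Spec_amazingSubrrcnt; infer_instance

-- ===== CLAIM (what is proved, stated in full; the proofs are below) =====
def Claim_equal_amazingSubrrcnt : Prop := ∀ (S : String), Dom_amazingSubrrcnt S → Spec_amazingSubrrcnt S (amazingSubrrcnt S)

-- ===== LEMMAS AND PROOFS =====

-- vowel test shared by both ports
def pvIsV (c : Char) : Bool := PySem.Set.contains (PySem.Set.ofList "aeiouAEIOU".toList) c

-- reference value: each vowel at position i of L contributes (L.length - i)
def pvSpec : List Char → Int
  | [] => 0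
  | c :: L => (if pvIsV c then (L.length : Int) + 1 else 0) + pvSpec L

-- A's loop, rebased to List.range over Nat indices, equals pvSpec
lemma pvAux_range (L : List Char) (acc : Int) :
    (List.range L.length).foldl
      (fun cnt k => if pvIsV (L.getD k ' ') then cnt + ((L.length : Int) - k) else cnt) acc
    = acc + pvSpec L := by
  induction L generalizing acc with
  | nil => simp [pvSpec]
  | cons c L ih =>
    rw [List.length_cons, List.range_succ_eq_map]
    simp only [List.foldl_cons, List.foldl_map, List.getD_cons_zero, List.getD_cons_succ]
    have hfun : (fun (cnt : Int) (k : Nat) =>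
        if pvIsV (L.getD k ' ') then cnt + (((L.length + 1 : Nat) : Int) - (k + 1 : Nat)) else cnt)
        = (fun (cnt : Int) (k : Nat) =>
        if pvIsV (L.getD k ' ') then cnt + ((L.length : Int) - k) else cnt) := by
      funext cnt k
      congr 1
      push_cast
      ring
    rw [hfun, ih]
    simp only [pvSpec]
    split <;> push_cast <;> ring
  
-- A's port equals pvSpec
lemma pvA_eq (S : String) : amazingSubrrcnt S = pvSpec S.toList := by
  unfold amazingSubrrcnt
  show (PySem.List.pyRange 0 ((S.toList.length : Int)) 1).foldl
      (fun cnt i => if pvIsV (PySem.List.pyGetD S.toList i ' ')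
        then cnt + ((S.toList.length : Int) - i) else cnt) 0 = pvSpec S.toList
  rw [PySem.List.pyRange_one]
  simp only [sub_zero, Int.toNat_natCast, List.foldl_map, zero_add,
    PySem.List.pyGetD_natCast]
  simpa using pvAux_range S.toList 0

-- B's loop: second component from state (v, a)
lemma pvAux_alt (L : List Char) (v a : Int) :
    (L.foldl (fun (p : Int × Int) ch =>
        let w := if pvIsV ch then p.1 + 1 else p.1
        (w, p.2 + w)) (v, a)).2
    = a + v * L.length + pvSpec L := by
  induction L generalizing v a with
  | nil => simp [pvSpec]
  | cons c L ih =>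
    simp only [List.foldl_cons, pvSpec]
    by_cases h : pvIsV c
    · simp only [h, if_true]
      rw [ih]
      push_cast [List.length_cons]
      ring
    · simp only [h]
      rw [ih]
      push_cast [List.length_cons]
      ring

lemma pvB_eq (S : String) : amazingSubrrcnt_alt S = pvSpec S.toList := by
  unfold amazingSubrrcnt_alt
  show (S.toList.foldl (fun (p : Int × Int) ch =>
      let w := if pvIsV ch then p.1 + 1 else p.1
      (w, p.2 + w)) (0, 0)).2 = pvSpec S.toList
  rw [pvAux_alt S.toList 0 0]
  ring

-- ===== VERDICT (by name: the statement is the Claim_ definition above) =====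
theorem amazingSubrrcnt_spec : Claim_equal_amazingSubrrcnt := by
  intro S _
  unfold Spec_amazingSubrrcnt
  rw [pvA_eq, pvB_eq]
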